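-- pv_equiv track=rewrite | github.com/cskykd/project-Vocational-Diploma-ai-Schedule | Backend/my/scheduler/ai_logic.py | get_valid_start_slots
-- ===== SOURCE A (Python) =====
-- SLOTS_PER_DAY = 12       # 12 คาบ (0-11)
--
-- LUNCH_BREAK_SLOT = 4     # พักเที่ยงคาบที่ 5 (Index 4)
--
-- def get_valid_start_slots(duration):
--     """หา Slot เริ่มต้นที่ลงได้โดยไม่เกินวันและไม่ทับพักเที่ยง"""
--     valid = []
--     # ป้องกัน duration เกินจำนวนคาบ
--     if duration > SLOTS_PER_DAY: duration = SLOTS_PER_DAY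
--
--     # เช็คทุก Slot ที่เป็นไปได้
--     for start in range(SLOTS_PER_DAY - duration + 1):
--         span = range(start, start + duration)
--         # ถ้าช่วงเวลานี้ ไม่ทับพักเที่ยง ให้ถือว่าใช้ได้
--         if LUNCH_BREAK_SLOT not in span:
--             valid.append(start)
--
--     # กรณีหาที่ลงไม่ได้เลย (เช่นวิชายาวมาก) ให้ยอมคืนค่าช่วงเวลาปกติไป (ดีกว่า Error)
--     if not valid:
--         valid = list(range(SLOTS_PER_DAY - duration + 1))
--
--     return valid
-- ===== SOURCE B (Python) =====
-- SLOTS_PER_DAY = 12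
--
-- LUNCH_BREAK_SLOT = 4
--
-- def get_valid_start_slots(duration):
--     """Closed form: the forbidden starts form one contiguous block around the lunch slot."""
--     d = min(duration, SLOTS_PER_DAY)
--     M = SLOTS_PER_DAY - d
--     if d <= 0:
--         # an empty span never covers the lunch slot: every start is valid
--         return list(range(M + 1))
--     lo = max(0, LUNCH_BREAK_SLOT - d + 1)   # first forbidden start
--     hi = min(LUNCH_BREAK_SLOT, M)           # last forbidden start
--     valid = list(range(lo)) + list(range(hi + 1, M + 1))
--     if not valid:
--         valid = list(range(M + 1))
--     return valid
-- ===== Notes on version B (the rewrite author's own statement) =====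
-- stated objective: simpler
-- what changed: Replaces the per-start scan with inner membership test by a closed-form computation of the contiguous forbidden interval of starts, building the answer as the concatenation of two ranges.
import Mathlib
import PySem

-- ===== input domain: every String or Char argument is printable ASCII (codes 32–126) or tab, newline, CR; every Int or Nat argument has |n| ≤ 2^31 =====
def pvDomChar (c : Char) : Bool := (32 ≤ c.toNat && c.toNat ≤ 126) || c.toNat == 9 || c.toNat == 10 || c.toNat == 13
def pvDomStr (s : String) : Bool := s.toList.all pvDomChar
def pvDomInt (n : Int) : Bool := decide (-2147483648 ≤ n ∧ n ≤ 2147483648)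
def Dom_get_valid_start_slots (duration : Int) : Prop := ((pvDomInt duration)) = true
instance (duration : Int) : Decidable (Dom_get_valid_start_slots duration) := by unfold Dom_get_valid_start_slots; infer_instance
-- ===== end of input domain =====

-- B computes the (contiguous) forbidden start interval in closed form instead of scanning every
-- start and testing membership of the lunch slot in its span; objective: simpler.

-- ===== PORT A =====
-- literal transliteration of A: clamp, scan all starts, append when lunch slot not in span, fallback
def get_valid_start_slots (duration : Int) : List Int :=
  let d := if duration > 12 then 12 else duration
  let valid := (PySem.List.pyRange 0 (12 - d + 1) 1).foldl
    (fun acc start =>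
      if ¬ ((4 : Int) ∈ PySem.List.pyRange start (start + d) 1) then acc ++ [start] else acc) []
  if valid = [] then PySem.List.pyRange 0 (12 - d + 1) 1 else valid

-- ===== PORT B =====
-- literal transliteration of B (Source B): closed-form forbidden block, two ranges concatenated
def get_valid_start_slots_alt (duration : Int) : List Int :=
  let d := min duration 12
  let M := 12 - d
  if d ≤ 0 then PySem.List.pyRange 0 (M + 1) 1
  else
    let lo := max 0 (4 - d + 1)
    let hi := min 4 M
    let valid := PySem.List.pyRange 0 lo 1 ++ PySem.List.pyRange (hi + 1) (M + 1) 1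
    if valid = [] then PySem.List.pyRange 0 (M + 1) 1 else valid

-- ===== PRECONDITION & SPEC =====
def Spec_get_valid_start_slots (duration : Int) (out : List Int) : Prop := out = get_valid_start_slots_alt duration
instance (duration : Int) (out : List Int) : Decidable (Spec_get_valid_start_slots duration out) := by unfold Spec_get_valid_start_slots; infer_instance

-- ===== CLAIM (what is proved, stated in full; the proofs are below) =====
def Claim_equal_get_valid_start_slots : Prop := ∀ (duration : Int), Dom_get_valid_start_slots duration → Spec_get_valid_start_slots duration (get_valid_start_slots duration)

-- ===== LEMMAS AND PROOFS =====

-- both programs depend only on the clamped duration: above 12 they agree with duration = 12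
lemma a_clamp {duration : Int} (h : 12 < duration) :
    get_valid_start_slots duration = get_valid_start_slots 12 := by
  simp only [get_valid_start_slots, if_pos h]
  norm_num

lemma b_clamp {duration : Int} (h : 12 < duration) :
    get_valid_start_slots_alt duration = get_valid_start_slots_alt 12 := by
  simp only [get_valid_start_slots_alt, min_eq_right h.le]
  norm_num

-- for a non-positive duration every span is empty, so A keeps every start
lemma eq_of_nonpos {duration : Int} (h : duration ≤ 0) :
    get_valid_start_slots duration = get_valid_start_slots_alt duration := by
  have hc : (if duration > 12 then (12 : Int) else duration) = duration := if_neg (by omega)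
  simp only [get_valid_start_slots, get_valid_start_slots_alt, hc, min_eq_left (by omega : duration ≤ 12), if_pos h]
  rw [PySem.List.foldl_append_ite_eq_filter]
  have hfilter : (PySem.List.pyRange 0 (12 - duration + 1) 1).filter
      (fun start => decide (¬ ((4 : Int) ∈ PySem.List.pyRange start (start + duration) 1))) =
      PySem.List.pyRange 0 (12 - duration + 1) 1 := by
    apply List.filter_eq_self.mpr
    intro s _
    simp only [PySem.List.mem_pyRange_one, decide_eq_true_eq]
    omega
  rw [hfilter, List.nil_append]
  have hne : PySem.List.pyRange 0 (12 - duration + 1) 1 ≠ [] := by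
    apply List.ne_nil_of_mem (a := (0 : Int))
    rw [PySem.List.mem_pyRange_one]
    omega
  rw [if_neg hne]

-- ===== VERDICT (by name: the statement is the Claim_ definition above) =====
theorem get_valid_start_slots_spec : Claim_equal_get_valid_start_slots := by
  intro duration _
  unfold Spec_get_valid_start_slots
  rcases le_or_gt duration 0 with h0 | h1
  · exact eq_of_nonpos h0
  · rcases le_or_gt duration 12 with h2 | h3
    · interval_cases duration <;> decide
    · rw [a_clamp h3, b_clamp h3]
      decide
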